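-- pv_equiv track=rewrite | github.com/samushka13/algo-lab-project | src/index.py | get_chains
-- ===== SOURCE A (Python) =====
-- def get_chains(arr: list, order: int):
--     arrays = []
--     for n in range(order + 1):
--         arrays.append(arr[n:])
--
--     chains = []
--     for x in zip(*arrays):
--         chains.append(x)
--
--     return chains
-- ===== SOURCE B (Python) =====
-- def get_chains(arr: list, order: int):
--     if order < 0:
--         return []
--     return [tuple(arr[i:i + order + 1]) for i in range(len(arr) - order)]
-- ===== Notes on version B (the rewrite author's own statement) =====
-- stated objective: simpler
-- what changed: B drops the order+1 shifted slice lists and the zip(*...) transpose, and instead emits each window arr[i:i+order+1] directly in a single indexed pass over range(len(arr)-order), guarded by order < 0.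
import Mathlib
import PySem

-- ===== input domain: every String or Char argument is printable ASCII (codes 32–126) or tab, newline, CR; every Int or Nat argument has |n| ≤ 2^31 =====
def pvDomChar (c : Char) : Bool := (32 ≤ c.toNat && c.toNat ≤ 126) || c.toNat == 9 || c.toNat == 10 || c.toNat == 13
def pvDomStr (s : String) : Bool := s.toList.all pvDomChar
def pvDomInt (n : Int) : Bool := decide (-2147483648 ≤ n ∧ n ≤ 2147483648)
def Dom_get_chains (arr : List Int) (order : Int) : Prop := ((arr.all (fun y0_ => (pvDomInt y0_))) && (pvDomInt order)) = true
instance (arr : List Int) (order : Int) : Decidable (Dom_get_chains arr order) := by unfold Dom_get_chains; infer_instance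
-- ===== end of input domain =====

-- B skips the shifted-slice lists and the zip transpose: it emits each window arr[i:i+order+1]
-- directly in one indexed pass (objective: simpler).

-- ===== PORT A =====
-- zip(*arrays): yields nothing when there are no arrays or any array is exhausted;
-- the fuel only makes the recursion total (always sufficient at the call site).
def zipN : Nat → List (List Int) → List (List Int)
  | 0, _ => []
  | fuel+1, ls =>
    if ls.isEmpty || ls.any List.isEmpty then []
    else ls.map (fun l => l.headD 0) :: zipN fuel (ls.map List.tail)

def get_chains (arr : List Int) (order : Int) : List (List Int) :=
  zipN (arr.length + 1)
    ((PySem.List.pyRange 0 (order + 1) 1).map (fun n => PySem.List.slice arr (some n) none))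

-- ===== PORT B =====
def get_chains_alt (arr : List Int) (order : Int) : List (List Int) :=
  if order < 0 then []
  else (PySem.List.pyRange 0 ((arr.length : Int) - order) 1).map
    (fun i => PySem.List.slice arr (some i) (some (i + order + 1)))

-- ===== PRECONDITION & SPEC =====
def Spec_get_chains (arr : List Int) (order : Int) (out : List (List Int)) : Prop := out = get_chains_alt arr order
instance (arr : List Int) (order : Int) (out : List (List Int)) : Decidable (Spec_get_chains arr order out) := by unfold Spec_get_chains; infer_instance

-- ===== CLAIM (what is proved, stated in full; the proofs are below) =====
def Claim_equal_get_chains : Prop := ∀ (arr : List Int) (order : Int), Dom_get_chains arr order → Spec_get_chains arr order (get_chains arr order)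

-- ===== LEMMAS AND PROOFS =====

-- reference form: the list of length-(d+1) windows of arr, front to back
def windows (d : Nat) : List Int → List (List Int)
  | [] => []
  | a :: t => if t.length < d then [] else (a :: t).take (d+1) :: windows d t

lemma map_headD_range (arr : List Int) : ∀ m, m ≤ arr.length →
    (List.range m).map (fun n => (arr.drop n).headD 0) = arr.take m := by
  intro m
  induction m with
  | zero => simp
  | succ k ih =>
    intro h
    rw [List.range_succ, List.map_append, ih (by omega), List.take_add_one]
    simp [List.headD_eq_head?_getD, List.head?_drop,
      List.getElem?_eq_getElem (by omega : k < arr.length)]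

lemma zipN_suffixes (d : Nat) : ∀ (arr : List Int) (fuel : Nat), arr.length < fuel →
    zipN fuel ((List.range (d+1)).map (fun n => arr.drop n)) = windows d arr := by
  intro arr
  induction arr with
  | nil =>
    rintro (_ | f) hf
    · omega
    · simp [zipN, windows, List.range_succ]
  | cons a t ih =>
    rintro (_ | f) hf
    · omega
    by_cases h : t.length < d
    · have hany : ((List.range (d+1)).map (fun n => (a :: t).drop n)).any List.isEmpty = true := by
        simp only [List.any_map, List.any_eq_true, Function.comp_def, List.isEmpty_iff,
          List.drop_eq_nil_iff, List.mem_range, List.length_cons]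
        exact ⟨t.length + 1, by omega, by omega⟩
      simp [zipN, hany, windows, h]
    · have hlen : d + 1 ≤ (a :: t).length := by simp; omega
      have hne : ((List.range (d+1)).map (fun n => (a :: t).drop n)).any List.isEmpty = false := by
        simp only [List.any_map, List.any_eq_false, Function.comp_def, List.isEmpty_iff,
          List.drop_eq_nil_iff, List.mem_range, List.length_cons]
        intro n hn; omega
      have hemp : ((List.range (d+1)).map (fun n => (a :: t).drop n)).isEmpty = false := by
        simp
      rw [zipN, hemp, hne]
      simp only [Bool.or_self, Bool.false_eq_true, if_false]
      rw [List.map_map, List.map_map]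
      have hheads : (List.range (d+1)).map
          ((fun l => l.headD 0) ∘ fun n => (a :: t).drop n) = (a :: t).take (d+1) :=
        map_headD_range (a :: t) (d+1) hlen
      have htails : (List.range (d+1)).map (List.tail ∘ fun n => (a :: t).drop n)
          = (List.range (d+1)).map (fun n => t.drop n) := by
        apply List.map_congr_left
        intro n hn
        simp [List.tail_drop]
      rw [hheads, htails, ih f (by simp at hf; omega)]
      rw [windows]
      simp [h]

lemma alt_eq_windows (d : Nat) : ∀ arr : List Int,
    (List.range (arr.length - d)).map (fun i => (arr.drop i).take (d+1)) = windows d arr := by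
  intro arr
  induction arr with
  | nil => simp [windows]
  | cons a t ih =>
    by_cases h : t.length < d
    · have h0 : (a :: t).length - d = 0 := by simp; omega
      simp [windows, h]
    · have hlen : (a :: t).length - d = (t.length - d) + 1 := by simp; omega
      rw [hlen, List.range_succ_eq_map, List.map_cons, List.map_map]
      have hstep : (List.range (t.length - d)).map
          ((fun i => ((a :: t).drop i).take (d+1)) ∘ Nat.succ)
          = (List.range (t.length - d)).map (fun i => (t.drop i).take (d+1)) := by
        apply List.map_congr_left
        intro n hn
        simp [Function.comp, List.drop_succ_cons]
      rw [hstep, ih, windows]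
      simp [h]

lemma get_chains_eq_windows (arr : List Int) (order : Int) (h : 0 ≤ order) :
    get_chains arr order = windows order.toNat arr := by
  unfold get_chains
  rw [PySem.List.pyRange_one]
  have ht : ((order + 1) - 0).toNat = order.toNat + 1 := by omega
  rw [ht, List.map_map]
  refine Eq.trans (congrArg (zipN (arr.length + 1)) (List.map_congr_left ?_))
    (zipN_suffixes order.toNat arr (arr.length + 1) (by omega))
  intro n hn
  simp only [Function.comp_apply]
  have e0 : (0 : Int) + (n : Int) = ((n : Nat) : Int) := by omega
  rw [e0, PySem.List.slice_from_natCast]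

lemma get_chains_alt_eq_windows (arr : List Int) (order : Int) (h : 0 ≤ order) :
    get_chains_alt arr order = windows order.toNat arr := by
  unfold get_chains_alt
  rw [if_neg (by omega)]
  rw [PySem.List.pyRange_one]
  have ht : (((arr.length : Int) - order) - 0).toNat = arr.length - order.toNat := by omega
  rw [ht, List.map_map]
  refine Eq.trans (List.map_congr_left ?_) (alt_eq_windows order.toNat arr)
  intro n hn
  simp only [Function.comp_apply]
  have e1 : ((0 : Int) + (n : Int)).toNat = n := by omega
  rw [PySem.List.slice_toNat arr (by omega) (by omega), e1]
  congr 1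
  omega

-- ===== VERDICT (by name: the statement is the Claim_ definition above) =====
theorem get_chains_spec : Claim_equal_get_chains := by
  intro arr order _
  unfold Spec_get_chains
  by_cases h : 0 ≤ order
  · rw [get_chains_eq_windows arr order h, get_chains_alt_eq_windows arr order h]
  · have hneg : order < 0 := by omega
    unfold get_chains get_chains_alt
    rw [if_pos hneg, PySem.List.pyRange_one_eq_nil (by omega)]
    simp [zipN]
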